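-- pv_equiv track=rewrite | github.com/Billytop/SUPER-AI-DATA-SCIENTIST | backend/laravel_modules/ai_brain/high_density/super_agent_planner.py | _generate_strategic_plan
-- ===== SOURCE A (Python) =====
-- from typing import Dict, List, Any
--
-- def _generate_strategic_plan(query: str, context: Dict) -> List[Dict]:
--     """ Breaks query into a sequence of agent tasks. """
--     plan = []
--     q = query.lower()
--
--     if any(w in q for w in ["loss", "profit", "erosion", "hasara", "faida"]):
--         plan.append({"agent": "Analyzer", "task": "calculate_margin_variance"})
--         plan.append({"agent": "Heuristic", "task": "detect_profit_erosion_cause"})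
--
--     if any(w in q for w in ["dead stock", "capital lock", "mtaji"]):
--         plan.append({"agent": "Expert", "task": "get_inventory_optimization_advice"})
--         plan.append({"agent": "Graph", "task": "map_impact_on_cashflow"})
--
--     if any(w in q for w in ["customer", "risk", "debt", "deni", "credit"]):
--         plan.append({"agent": "Debt", "task": "calculate_risk_and_limit"})
--
--     if any(w in q for w in ["fraud", "audit", "anomaly", "wizi", "misused", "check"]):
--         plan.append({"agent": "Forensic", "task": "perform_deep_audit"})
--
--     if any(w in q for w in ["market", "trend", "price", "elasticity", "competitor", "bezo"]):
--         plan.append({"agent": "Market", "task": "simulate_market_impact"})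
--
--     if any(w in q for w in ["delivery", "warehouse", "logistics", "shipping", "stoo"]):
--         plan.append({"agent": "Logistics", "task": "optimize_supply_chain"})
--
--     if any(w in q for w in ["employee", "staff", "payroll", "performance", "mshahara"]):
--         plan.append({"agent": "HR", "task": "analyze_human_capital"})
--
--     if any(w in q for w in ["future", "forecast", "prediction", "predict", "predictive", "lstm", "transformer"]):
--         plan.append({"agent": "Transformer", "task": "deep_attention_reasoning"})
--         plan.append({"agent": "LSTM", "task": "time_series_forecasting"})
--         plan.append({"agent": "MoE", "task": "route_to_specialized_experts"})
--
--     return plan or [{"agent": "Analyzer", "task": "general_business_check"}]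
-- ===== SOURCE B (Python) =====
-- # Different algorithm: a single left-to-right scan of the query (a naive
-- # multi-pattern matcher) collects the set of matched rule-group ids; the plan
-- # is then assembled from the sorted ids.  A instead runs one substring search
-- # per keyword in eight hard-coded if-blocks.
--
-- GROUP_TASKS = [
--     [{"agent": "Analyzer", "task": "calculate_margin_variance"},
--      {"agent": "Heuristic", "task": "detect_profit_erosion_cause"}],
--     [{"agent": "Expert", "task": "get_inventory_optimization_advice"},
--      {"agent": "Graph", "task": "map_impact_on_cashflow"}],
--     [{"agent": "Debt", "task": "calculate_risk_and_limit"}],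
--     [{"agent": "Forensic", "task": "perform_deep_audit"}],
--     [{"agent": "Market", "task": "simulate_market_impact"}],
--     [{"agent": "Logistics", "task": "optimize_supply_chain"}],
--     [{"agent": "HR", "task": "analyze_human_capital"}],
--     [{"agent": "Transformer", "task": "deep_attention_reasoning"},
--      {"agent": "LSTM", "task": "time_series_forecasting"},
--      {"agent": "MoE", "task": "route_to_specialized_experts"}],
-- ]
--
-- KEYWORDS = [
--     ("loss", 0), ("profit", 0), ("erosion", 0), ("hasara", 0), ("faida", 0),
--     ("dead stock", 1), ("capital lock", 1), ("mtaji", 1),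
--     ("customer", 2), ("risk", 2), ("debt", 2), ("deni", 2), ("credit", 2),
--     ("fraud", 3), ("audit", 3), ("anomaly", 3), ("wizi", 3), ("misused", 3), ("check", 3),
--     ("market", 4), ("trend", 4), ("price", 4), ("elasticity", 4), ("competitor", 4), ("bezo", 4),
--     ("delivery", 5), ("warehouse", 5), ("logistics", 5), ("shipping", 5), ("stoo", 5),
--     ("employee", 6), ("staff", 6), ("payroll", 6), ("performance", 6), ("mshahara", 6),
--     ("future", 7), ("forecast", 7), ("prediction", 7), ("predict", 7),
--     ("predictive", 7), ("lstm", 7), ("transformer", 7),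
-- ]
--
-- def _generate_strategic_plan(query, context):
--     q = query.lower()
--     hit = set()
--     for i in range(len(q)):
--         for w, g in KEYWORDS:
--             if q.startswith(w, i):
--                 hit.add(g)
--     plan = [dict(t) for g in sorted(hit) for t in GROUP_TASKS[g]]
--     return plan or [{"agent": "Analyzer", "task": "general_business_check"}]
-- ===== Notes on version B (the rewrite author's own statement) =====
-- stated objective: alternative
-- what changed: Replaces A's eight per-keyword substring-search if-blocks by a single left-to-right position scan of the query (a naive multi-pattern matcher over a flat keyword->group table) that collects the set of matched group ids and then assembles the plan from the sorted ids.
import Mathlib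
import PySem

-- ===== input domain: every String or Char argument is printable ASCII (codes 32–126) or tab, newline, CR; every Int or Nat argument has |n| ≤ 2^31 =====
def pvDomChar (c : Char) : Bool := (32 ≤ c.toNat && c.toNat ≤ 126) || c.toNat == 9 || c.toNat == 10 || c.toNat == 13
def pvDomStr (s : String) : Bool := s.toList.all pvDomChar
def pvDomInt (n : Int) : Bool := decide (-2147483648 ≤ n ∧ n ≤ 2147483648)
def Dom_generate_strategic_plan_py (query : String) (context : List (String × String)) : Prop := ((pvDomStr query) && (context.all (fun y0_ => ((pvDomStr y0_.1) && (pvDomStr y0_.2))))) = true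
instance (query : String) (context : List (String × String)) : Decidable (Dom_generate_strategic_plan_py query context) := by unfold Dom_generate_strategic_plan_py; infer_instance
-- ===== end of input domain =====

-- B replaces A's eight per-keyword substring-search if-blocks by a single left-to-right
-- position scan of the query (naive multi-pattern matcher) that collects the set of matched
-- rule-group ids, then assembles the plan from the sorted ids (alternative algorithm; same result).

-- ===== PORT A =====
def generate_strategic_plan_py (query : String) (context : List (String × String)) : List (List (String × String)) :=
  let plan : List (List (String × String)) := []
  let q := PySem.Str.lower query
  let plan := if (["loss", "profit", "erosion", "hasara", "faida"] : List String).any (fun w => PySem.Str.isIn w q) then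
      plan ++ [[("agent", "Analyzer"), ("task", "calculate_margin_variance")],
               [("agent", "Heuristic"), ("task", "detect_profit_erosion_cause")]] else plan
  let plan := if (["dead stock", "capital lock", "mtaji"] : List String).any (fun w => PySem.Str.isIn w q) then
      plan ++ [[("agent", "Expert"), ("task", "get_inventory_optimization_advice")],
               [("agent", "Graph"), ("task", "map_impact_on_cashflow")]] else plan
  let plan := if (["customer", "risk", "debt", "deni", "credit"] : List String).any (fun w => PySem.Str.isIn w q) then
      plan ++ [[("agent", "Debt"), ("task", "calculate_risk_and_limit")]] else plan
  let plan := if (["fraud", "audit", "anomaly", "wizi", "misused", "check"] : List String).any (fun w => PySem.Str.isIn w q) then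
      plan ++ [[("agent", "Forensic"), ("task", "perform_deep_audit")]] else plan
  let plan := if (["market", "trend", "price", "elasticity", "competitor", "bezo"] : List String).any (fun w => PySem.Str.isIn w q) then
      plan ++ [[("agent", "Market"), ("task", "simulate_market_impact")]] else plan
  let plan := if (["delivery", "warehouse", "logistics", "shipping", "stoo"] : List String).any (fun w => PySem.Str.isIn w q) then
      plan ++ [[("agent", "Logistics"), ("task", "optimize_supply_chain")]] else plan
  let plan := if (["employee", "staff", "payroll", "performance", "mshahara"] : List String).any (fun w => PySem.Str.isIn w q) then
      plan ++ [[("agent", "HR"), ("task", "analyze_human_capital")]] else plan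
  let plan := if (["future", "forecast", "prediction", "predict", "predictive", "lstm", "transformer"] : List String).any (fun w => PySem.Str.isIn w q) then
      plan ++ [[("agent", "Transformer"), ("task", "deep_attention_reasoning")],
               [("agent", "LSTM"), ("task", "time_series_forecasting")],
               [("agent", "MoE"), ("task", "route_to_specialized_experts")]] else plan
  if plan.isEmpty then [[("agent", "Analyzer"), ("task", "general_business_check")]] else plan

-- ===== PORT B =====
-- GROUP_TASKS of Source B
def pvGroupTasks : List (List (List (String × String))) :=
  [ [[("agent", "Analyzer"), ("task", "calculate_margin_variance")],
     [("agent", "Heuristic"), ("task", "detect_profit_erosion_cause")]],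
    [[("agent", "Expert"), ("task", "get_inventory_optimization_advice")],
     [("agent", "Graph"), ("task", "map_impact_on_cashflow")]],
    [[("agent", "Debt"), ("task", "calculate_risk_and_limit")]],
    [[("agent", "Forensic"), ("task", "perform_deep_audit")]],
    [[("agent", "Market"), ("task", "simulate_market_impact")]],
    [[("agent", "Logistics"), ("task", "optimize_supply_chain")]],
    [[("agent", "HR"), ("task", "analyze_human_capital")]],
    [[("agent", "Transformer"), ("task", "deep_attention_reasoning")],
     [("agent", "LSTM"), ("task", "time_series_forecasting")],
     [("agent", "MoE"), ("task", "route_to_specialized_experts")]] ]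

-- KEYWORDS of Source B: flat (keyword, group id) list
def pvKeywords : List (String × Nat) :=
  [ ("loss", 0), ("profit", 0), ("erosion", 0), ("hasara", 0), ("faida", 0),
    ("dead stock", 1), ("capital lock", 1), ("mtaji", 1),
    ("customer", 2), ("risk", 2), ("debt", 2), ("deni", 2), ("credit", 2),
    ("fraud", 3), ("audit", 3), ("anomaly", 3), ("wizi", 3), ("misused", 3), ("check", 3),
    ("market", 4), ("trend", 4), ("price", 4), ("elasticity", 4), ("competitor", 4), ("bezo", 4),
    ("delivery", 5), ("warehouse", 5), ("logistics", 5), ("shipping", 5), ("stoo", 5),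
    ("employee", 6), ("staff", 6), ("payroll", 6), ("performance", 6), ("mshahara", 6),
    ("future", 7), ("forecast", 7), ("prediction", 7), ("predict", 7),
    ("predictive", 7), ("lstm", 7), ("transformer", 7) ]

def generate_strategic_plan_py_alt (query : String) (context : List (String × String)) : List (List (String × String)) :=
  let qs := PySem.Chars.lower query.toList
  -- position scan: q.startswith(w, i) is Chars.startswith (qs.drop i) w.toList
  let hit : PySem.Set Nat :=
    (List.range qs.length).foldl (fun h i =>
      pvKeywords.foldl (fun h p =>
        if PySem.Chars.startswith (qs.drop i) p.1.toList then PySem.Set.add h p.2 else h) h)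
      PySem.Set.empty
  let plan := (PySem.List.sorted hit (fun g => g) false).flatMap (fun g => pvGroupTasks.getD g [])
  if plan.isEmpty then [[("agent", "Analyzer"), ("task", "general_business_check")]] else plan

-- ===== PRECONDITION & SPEC =====
def Spec_generate_strategic_plan_py (query : String) (context : List (String × String)) (out : List (List (String × String))) : Prop := out = generate_strategic_plan_py_alt query context
instance (query : String) (context : List (String × String)) (out : List (List (String × String))) : Decidable (Spec_generate_strategic_plan_py query context out) := by unfold Spec_generate_strategic_plan_py; infer_instance

-- ===== CLAIM =====
def Claim_equal_generate_strategic_plan_py : Prop := ∀ (query : String) (context : List (String × String)), Dom_generate_strategic_plan_py query context → Spec_generate_strategic_plan_py query context (generate_strategic_plan_py query context)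

-- ===== LEMMAS AND PROOFS =====

-- group-g hit condition, expressed with substring search (what the position scan decides)
def pvCond (qs : List Char) (g : Nat) : Bool :=
  pvKeywords.any (fun p => p.2 == g && PySem.Chars.isIn p.1.toList qs)

lemma pvKeywords_ne_nil : ∀ p ∈ pvKeywords, p.1.toList ≠ [] := by decide
lemma pvKeywords_lt8 : ∀ p ∈ pvKeywords, p.2 < 8 := by decide

lemma pv_inner_mem (qs : List Char) (i : Nat) (kws : List (String × Nat)) (h : List Nat) (g : Nat) :
    g ∈ kws.foldl (fun h p =>
        if PySem.Chars.startswith (qs.drop i) p.1.toList then PySem.Set.add h p.2 else h) h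
      ↔ g ∈ h ∨ ∃ p ∈ kws, p.2 = g ∧ PySem.Chars.startswith (qs.drop i) p.1.toList = true := by
  induction kws generalizing h with
  | nil => simp
  | cons p t ih =>
    simp only [List.foldl_cons, ih]
    by_cases hs : PySem.Chars.startswith (qs.drop i) p.1.toList = true
    · rw [if_pos hs]
      constructor
      · rintro (hm | ⟨p', hp', he, hs'⟩)
        · rcases (PySem.Set.mem_add _ _ _).mp hm with hg | rfl
          · exact Or.inl hg
          · exact Or.inr ⟨p, List.mem_cons_self, rfl, hs⟩
        · exact Or.inr ⟨p', List.mem_cons_of_mem _ hp', he, hs'⟩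
      · rintro (hg | ⟨p', hp', he, hs'⟩)
        · exact Or.inl ((PySem.Set.mem_add _ _ _).mpr (Or.inl hg))
        · rcases List.mem_cons.mp hp' with rfl | hp''
          · exact Or.inl ((PySem.Set.mem_add _ _ _).mpr (Or.inr he.symm))
          · exact Or.inr ⟨p', hp'', he, hs'⟩
    · rw [if_neg hs]
      constructor
      · rintro (hg | ⟨p', hp', he, hs'⟩)
        · exact Or.inl hg
        · exact Or.inr ⟨p', List.mem_cons_of_mem _ hp', he, hs'⟩
      · rintro (hg | ⟨p', hp', he, hs'⟩)
        · exact Or.inl hg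
        · rcases List.mem_cons.mp hp' with rfl | hp''
          · exact absurd hs' hs
          · exact Or.inr ⟨p', hp'', he, hs'⟩

lemma pv_inner_nodup (qs : List Char) (i : Nat) (kws : List (String × Nat)) (h : List Nat)
    (hn : h.Nodup) :
    (kws.foldl (fun h p =>
        if PySem.Chars.startswith (qs.drop i) p.1.toList then PySem.Set.add h p.2 else h) h).Nodup := by
  induction kws generalizing h with
  | nil => exact hn
  | cons p t ih =>
    simp only [List.foldl_cons]
    apply ih
    split
    · exact PySem.Set.nodup_add _ _ hn
    · exact hn

lemma pv_outer_mem (qs : List Char) (is : List Nat) (h : List Nat) (g : Nat) :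
    g ∈ is.foldl (fun h i =>
        pvKeywords.foldl (fun h p =>
          if PySem.Chars.startswith (qs.drop i) p.1.toList then PySem.Set.add h p.2 else h) h) h
      ↔ g ∈ h ∨ ∃ i ∈ is, ∃ p ∈ pvKeywords, p.2 = g ∧ PySem.Chars.startswith (qs.drop i) p.1.toList = true := by
  induction is generalizing h with
  | nil => simp
  | cons j t ih =>
    simp only [List.foldl_cons, ih, pv_inner_mem]
    constructor
    · rintro (⟨hg | ⟨p, hp, he, hs⟩⟩ | ⟨i, hi, p, hp, he, hs⟩)
      · exact Or.inl hg
      · exact Or.inr ⟨j, by simp, p, hp, he, hs⟩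
      · exact Or.inr ⟨i, by simp [hi], p, hp, he, hs⟩
    · rintro (hg | ⟨i, hi, p, hp, he, hs⟩)
      · exact Or.inl (Or.inl hg)
      · rcases List.mem_cons.mp hi with rfl | hi
        · exact Or.inl (Or.inr ⟨p, hp, he, hs⟩)
        · exact Or.inr ⟨i, hi, p, hp, he, hs⟩

lemma pv_outer_nodup (qs : List Char) (is : List Nat) (h : List Nat) (hn : h.Nodup) :
    (is.foldl (fun h i =>
        pvKeywords.foldl (fun h p =>
          if PySem.Chars.startswith (qs.drop i) p.1.toList then PySem.Set.add h p.2 else h) h) h).Nodup := by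
  induction is generalizing h with
  | nil => exact hn
  | cons j t ih => exact ih _ (pv_inner_nodup qs j pvKeywords h hn)

-- g is collected by the scan iff some keyword of group g is a substring of qs
lemma pv_hit_iff (qs : List Char) (g : Nat) :
    g ∈ (List.range qs.length).foldl (fun h i =>
        pvKeywords.foldl (fun h p =>
          if PySem.Chars.startswith (qs.drop i) p.1.toList then PySem.Set.add h p.2 else h) h)
        ([] : List Nat)
      ↔ pvCond qs g = true := by
  rw [pv_outer_mem]
  simp only [List.not_mem_nil, false_or, pvCond, List.any_eq_true,
    Bool.and_eq_true, beq_iff_eq]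
  constructor
  · rintro ⟨i, _, p, hp, he, hs⟩
    refine ⟨p, hp, he, ?_⟩
    rw [← PySem.Chars.exists_prefix_drop_iff_isIn]
    exact ⟨i, (PySem.Chars.startswith_iff _ _).mp hs⟩
  · rintro ⟨p, hp, he, hin⟩
    obtain ⟨j, hj⟩ := (PySem.Chars.exists_prefix_drop_iff_isIn _ _).mpr hin
    have hjlt : j < qs.length := by
      by_contra hge
      rw [List.drop_eq_nil_of_le (le_of_not_gt hge)] at hj
      exact pvKeywords_ne_nil p hp (List.prefix_nil.mp hj)
    exact ⟨j, List.mem_range.mpr hjlt, p, hp, he, (PySem.Chars.startswith_iff _ _).mpr hj⟩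

-- the sorted hit-set is the filtered range of group ids
lemma pv_sorted_hit (qs : List Char) :
    PySem.List.sorted
      ((List.range qs.length).foldl (fun h i =>
        pvKeywords.foldl (fun h p =>
          if PySem.Chars.startswith (qs.drop i) p.1.toList then PySem.Set.add h p.2 else h) h)
        ([] : List Nat)) (fun g => g) false
    = (List.range 8).filter (fun g => pvCond qs g) := by
  apply PySem.List.sorted_eq_of_perm_of_pairwise_lt
  · refine (List.perm_ext_iff_of_nodup ((List.nodup_range).filter _)
      (pv_outer_nodup qs _ _ List.nodup_nil)).mpr ?_
    intro a
    rw [List.mem_filter, List.mem_range, pv_hit_iff]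
    constructor
    · rintro ⟨_, hc⟩; exact hc
    · intro hc
      refine ⟨?_, hc⟩
      simp only [pvCond, List.any_eq_true, Bool.and_eq_true, beq_iff_eq] at hc
      obtain ⟨p, hp, he, _⟩ := hc
      exact he ▸ pvKeywords_lt8 p hp
  · exact (List.pairwise_lt_range).filter _

-- ===== VERDICT =====
lemma pv_group0 (qs : List Char) :
    pvCond qs 0 = (["loss", "profit", "erosion", "hasara", "faida"] : List String).any (fun w => PySem.Chars.isIn w.toList qs) := by
  simp [pvCond, pvKeywords]

lemma pv_group1 (qs : List Char) :
    pvCond qs 1 = (["dead stock", "capital lock", "mtaji"] : List String).any (fun w => PySem.Chars.isIn w.toList qs) := by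
  simp [pvCond, pvKeywords]

lemma pv_group2 (qs : List Char) :
    pvCond qs 2 = (["customer", "risk", "debt", "deni", "credit"] : List String).any (fun w => PySem.Chars.isIn w.toList qs) := by
  simp [pvCond, pvKeywords]

lemma pv_group3 (qs : List Char) :
    pvCond qs 3 = (["fraud", "audit", "anomaly", "wizi", "misused", "check"] : List String).any (fun w => PySem.Chars.isIn w.toList qs) := by
  simp [pvCond, pvKeywords]

lemma pv_group4 (qs : List Char) :
    pvCond qs 4 = (["market", "trend", "price", "elasticity", "competitor", "bezo"] : List String).any (fun w => PySem.Chars.isIn w.toList qs) := by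
  simp [pvCond, pvKeywords]

lemma pv_group5 (qs : List Char) :
    pvCond qs 5 = (["delivery", "warehouse", "logistics", "shipping", "stoo"] : List String).any (fun w => PySem.Chars.isIn w.toList qs) := by
  simp [pvCond, pvKeywords]

lemma pv_group6 (qs : List Char) :
    pvCond qs 6 = (["employee", "staff", "payroll", "performance", "mshahara"] : List String).any (fun w => PySem.Chars.isIn w.toList qs) := by
  simp [pvCond, pvKeywords]

lemma pv_group7 (qs : List Char) :
    pvCond qs 7 = (["future", "forecast", "prediction", "predict", "predictive", "lstm", "transformer"] : List String).any (fun w => PySem.Chars.isIn w.toList qs) := by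
  simp [pvCond, pvKeywords]

-- ===== VERDICT =====
set_option maxHeartbeats 2000000 in
theorem generate_strategic_plan_py_spec : Claim_equal_generate_strategic_plan_py := by
  intro query context _
  unfold Spec_generate_strategic_plan_py generate_strategic_plan_py generate_strategic_plan_py_alt
  have hr : List.range 8 = [0, 1, 2, 3, 4, 5, 6, 7] := rfl
  simp only [PySem.Set.empty]
  simp only [pv_sorted_hit, hr, List.filter_cons, List.filter_nil,
    pv_group0, pv_group1, pv_group2, pv_group3, pv_group4, pv_group5, pv_group6, pv_group7,
    PySem.Str.isIn_eq, PySem.Str.toList_lower]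
  generalize (List.any _ _ : Bool) = c1
  generalize (List.any _ _ : Bool) = c2
  generalize (List.any _ _ : Bool) = c3
  generalize (List.any _ _ : Bool) = c4
  generalize (List.any _ _ : Bool) = c5
  generalize (List.any _ _ : Bool) = c6
  generalize (List.any _ _ : Bool) = c7
  generalize (List.any _ _ : Bool) = c8
  cases c1 <;> cases c2 <;> cases c3 <;> cases c4 <;> cases c5 <;> cases c6 <;> cases c7 <;> cases c8 <;> rfl
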